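-- pv_equiv track=rewrite | github.com/videntity/provider-data-tools | pdt/get_npi_set_from_csv_column.py | clean_headers
-- ===== SOURCE A (Python) =====
-- def clean_headers(headers):
--     cleaned_headers = []
--     for c in headers:
--         c = c.replace(".", "")
--         c = c.replace("(", "")
--         c = c.replace(")", "")
--         c = c.replace("$", "-")
--         c = c.replace(" ", "_")
--         c = c.replace("/", "-")
--         c = c.replace("\\", "-")
--         cleaned_headers.append(c)
--     return cleaned_headers
-- ===== SOURCE B (Python) =====
-- def clean_headers(headers):
--     out = []
--     for h in headers:
--         buf = []
--         for ch in h: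
--             if ch in ".()":
--                 continue
--             elif ch in "$/\\":
--                 buf.append("-")
--             elif ch == " ":
--                 buf.append("_")
--             else:
--                 buf.append(ch)
--         out.append("".join(buf))
--     return out
-- ===== Notes on version B (the rewrite author's own statement) =====
-- stated objective: alternative
-- what changed: A rewrites each header with seven sequential whole-string replace passes (seven intermediate strings); B scans each header once, character by character, classifying each character (drop, map to '-' or '_', or keep) into an accumulator buffer joined at the end.
import Mathlib
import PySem

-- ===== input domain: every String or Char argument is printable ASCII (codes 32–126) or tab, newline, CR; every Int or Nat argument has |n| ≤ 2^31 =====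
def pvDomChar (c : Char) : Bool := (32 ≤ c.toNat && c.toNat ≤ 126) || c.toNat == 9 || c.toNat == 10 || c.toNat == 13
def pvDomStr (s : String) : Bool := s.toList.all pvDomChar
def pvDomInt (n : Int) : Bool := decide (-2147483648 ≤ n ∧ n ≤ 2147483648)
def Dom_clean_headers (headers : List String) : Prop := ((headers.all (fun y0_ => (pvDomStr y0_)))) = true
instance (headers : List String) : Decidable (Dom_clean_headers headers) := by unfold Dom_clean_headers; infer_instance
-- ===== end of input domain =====

-- B replaces A's seven sequential whole-string replace passes by a single
-- character-by-character scan of each header with an accumulator buffer (objective: alternative).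
-- ===== PORT A =====
def clean_headers (headers : List String) : List String :=
  headers.foldl (fun cleaned_headers c =>
    let c := PySem.Str.replace c "." ""
    let c := PySem.Str.replace c "(" ""
    let c := PySem.Str.replace c ")" ""
    let c := PySem.Str.replace c "$" "-"
    let c := PySem.Str.replace c " " "_"
    let c := PySem.Str.replace c "/" "-"
    let c := PySem.Str.replace c "\\" "-"
    cleaned_headers ++ [c]) []

-- ===== PORT B =====
-- the inner per-character loop of Source B: classify ch and extend the buffer
def pvStep (buf : List Char) (ch : Char) : List Char :=
  if (".()".toList).contains ch then buf
  else if ("$/\\".toList).contains ch then buf ++ ['-']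
  else if ch = ' ' then buf ++ ['_']
  else buf ++ [ch]

def clean_headers_alt (headers : List String) : List String :=
  headers.foldl (fun out h =>
    out ++ [String.ofList (h.toList.foldl pvStep [])]) []

-- ===== PRECONDITION & SPEC =====
def Spec_clean_headers (headers : List String) (out : List String) : Prop := out = clean_headers_alt headers
instance (headers : List String) (out : List String) : Decidable (Spec_clean_headers headers out) := by unfold Spec_clean_headers; infer_instance

-- ===== CLAIM (what is proved, stated in full; the proofs are below) =====
def Claim_equal_clean_headers : Prop := ∀ (headers : List String), Dom_clean_headers headers → Spec_clean_headers headers (clean_headers headers)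

-- ===== LEMMAS AND PROOFS =====
-- the per-character translation B's scan performs on each character
def pvTrB (c : Char) : List Char :=
  if (".()".toList).contains c then []
  else if ("$/\\".toList).contains c then ['-']
  else if c = ' ' then ['_']
  else [c]

lemma foldl_pvStep (s : List Char) : ∀ acc, s.foldl pvStep acc = acc ++ s.flatMap pvTrB := by
  induction s with
  | nil => intro acc; simp
  | cons c t ih =>
    intro acc
    simp only [List.foldl_cons, List.flatMap_cons, ih]
    unfold pvStep pvTrB
    split_ifs <;> simp

-- replacing a single character is a per-character flatMap
lemma go_single (o : Char) (new : List Char) :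
    ∀ (s : List Char) (fuel : Nat) (acc : List Char), s.length ≤ fuel →
    PySem.Chars.replace.go [o] new fuel s acc
      = acc.reverse ++ s.flatMap (fun c => if c = o then new else [c]) := by
  intro s
  induction s with
  | nil => intro fuel acc _; cases fuel <;> simp [PySem.Chars.replace.go]
  | cons c t ih =>
    intro fuel acc hf
    cases fuel with
    | zero => simp at hf
    | succ n =>
      rw [PySem.Chars.replace.go]
      by_cases h : c = o
      · subst h
        simp only [List.isPrefixOf, BEq.rfl, Bool.true_and, if_true]
        rw [show List.drop [c].length (c :: t) = t from rfl]
        rw [ih _ _ (by simpa using hf)]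
        simp
      · have : ([o].isPrefixOf (c :: t)) = false := by
          simp [List.isPrefixOf]; exact fun hh => absurd hh.symm h
        rw [this]
        simp only [Bool.false_eq_true, if_false]
        rw [ih _ _ (by simpa using hf)]
        simp [h]

lemma replace_single (s : List Char) (o : Char) (new : List Char) :
    PySem.Chars.replace s [o] new = s.flatMap (fun c => if c = o then new else [c]) := by
  rw [PySem.Chars.replace]
  simp only [List.isEmpty_cons, Bool.false_eq_true, if_false]
  exact go_single o new s s.length [] (le_refl _)

-- the seven single-character replaces of A collapse to B's per-character translation
lemma seven_eq_tr (s : List Char) :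
    ((((((s.flatMap (fun c => if c = '.' then [] else [c])).flatMap
        (fun c => if c = '(' then [] else [c])).flatMap
        (fun c => if c = ')' then [] else [c])).flatMap
        (fun c => if c = '$' then ['-'] else [c])).flatMap
        (fun c => if c = ' ' then ['_'] else [c])).flatMap
        (fun c => if c = '/' then ['-'] else [c])).flatMap
        (fun c => if c = '\\' then ['-'] else [c])
      = s.flatMap pvTrB := by
  simp only [List.flatMap_assoc]
  refine List.flatMap_congr (fun c _ => ?_)
  by_cases h1 : c = '.' <;> by_cases h2 : c = '(' <;> by_cases h3 : c = ')' <;>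
    by_cases h4 : c = '$' <;> by_cases h5 : c = ' ' <;> by_cases h6 : c = '/' <;>
    by_cases h7 : c = '\\' <;> simp_all [pvTrB]

lemma header_eq (c : String) :
    PySem.Str.replace (PySem.Str.replace (PySem.Str.replace (PySem.Str.replace
      (PySem.Str.replace (PySem.Str.replace (PySem.Str.replace c "." "") "(" "")
      ")" "") "$" "-") " " "_") "/" "-") "\\" "-"
      = String.ofList (c.toList.foldl pvStep []) := by
  rw [foldl_pvStep, List.nil_append]
  simp only [PySem.Str.replace, String.toList_ofList]
  rw [show (".").toList = ['.'] from rfl, show ("(").toList = ['('] from rfl,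
      show (")").toList = [')'] from rfl, show ("$").toList = ['$'] from rfl,
      show (" ").toList = [' '] from rfl, show ("/").toList = ['/'] from rfl,
      show ("\\").toList = ['\\'] from rfl, show ("").toList = ([] : List Char) from rfl,
      show ("-").toList = ['-'] from rfl, show ("_").toList = ['_'] from rfl]
  simp only [replace_single]
  rw [seven_eq_tr c.toList]

-- ===== VERDICT (by name: the statement is the Claim_ definition above) =====
theorem clean_headers_spec : Claim_equal_clean_headers := by
  intro headers _
  unfold Spec_clean_headers clean_headers clean_headers_alt
  rw [PySem.List.foldl_append_singleton_eq_map, PySem.List.foldl_append_singleton_eq_map]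
  exact List.map_congr_left (fun c _ => header_eq c)
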